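-- pv_equiv track=rewrite | github.com/Tubskleyson/StringProcessing | algoritmos/shift_and.py | shift_and
-- ===== SOURCE A (Python) =====
-- def shift_and(P, T):
--
--     """
--     Realiza a busca por meio de shift-and exato
--     :param str P:
--     :param str T:
--     :return int[]:
--     """
--
--     r = []
--
--     m = len(P)
--     n = len(T)
--
--     M = {}
--
--     for c in P:
--         M[c] = 0
--
--
--     for j in range(m):
--         M[P[j]] = M[P[j]] | 2**(m-j-1)
--
--
--     R = 0
--
--     for i in range(n):
--
--         if T[i] in P: R = ((R >> 1) | 2 ** (m-1)) & M[T[i]]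
--         else: R = ((R >> 1) | 2 ** (m-1)) & 0
--
--         if R & 1 != 0 :r.append(i - m + 1)
--
--     return r
-- ===== SOURCE B (Python) =====
-- def shift_and(P, T):
--     """Same exact matching, done by direct sliding-window slice comparison."""
--     m = len(P)
--     return [s for s in range(len(T) - m + 1) if T[s:s+m] == P]
-- ===== Notes on version B (the rewrite author's own statement) =====
-- stated objective: simpler
-- what changed: Replaces the bit-parallel shift-and automaton (bitmask dict built from P, big-int shifted register, per-character membership re-scan of P) by a one-line sliding-window comparison of each length-m slice of T with P.
-- outside the precondition, e.g. on shift_and('', ''): A returns [], B returns [0]; on shift_and('', 'ab'): A raises TypeError, B returns [0, 1, 2]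
import Mathlib
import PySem

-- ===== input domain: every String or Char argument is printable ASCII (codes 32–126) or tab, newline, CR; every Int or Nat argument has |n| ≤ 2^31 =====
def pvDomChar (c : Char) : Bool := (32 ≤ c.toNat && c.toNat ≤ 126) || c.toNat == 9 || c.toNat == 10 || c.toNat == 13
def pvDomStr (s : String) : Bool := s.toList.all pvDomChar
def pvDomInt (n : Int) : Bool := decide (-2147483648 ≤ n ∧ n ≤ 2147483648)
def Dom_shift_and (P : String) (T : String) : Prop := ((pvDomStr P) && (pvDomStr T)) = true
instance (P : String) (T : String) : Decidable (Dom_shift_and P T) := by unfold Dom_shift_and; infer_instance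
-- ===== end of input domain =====

-- B replaces A's bit-parallel shift-and automaton by a direct sliding-window slice comparison (objective: simpler).

-- ===== PORT A =====
def shift_and (P : String) (T : String) : List Int :=
  let r : List Int := []
  let m : Int := PySem.Str.len P
  let n : Int := PySem.Str.len T
  -- M = {} ; for c in P: M[c] = 0
  let M0 : PySem.Dict Char Int := P.toList.foldl (fun M c => M.insert c 0) PySem.Dict.empty
  -- for j in range(m): M[P[j]] = M[P[j]] | 2**(m-j-1)
  -- P[j] is in range for every j in range(m) (pyGetD is exact there) and the key P[j] is present;
  -- the exponent m-j-1 is ≥ 0 for j in range(m), so .toNat is exact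
  let M : PySem.Dict Char Int := (PySem.List.pyRange 0 m 1).foldl
    (fun M j =>
      let c := PySem.List.pyGetD P.toList j ' '
      M.insert c (PySem.Int.bor (M.getD c 0) ((2 : Int) ^ (m - j - 1).toNat))) M0
  -- R = 0 ; for i in range(n): …
  -- T[i] is in range for i in range(n); the key T[i] is present when 'T[i] in P';
  -- for m = 0 Python's 2**(m-1) is the float 0.5 and the loop raises TypeError on non-empty T
  -- (Pre_shift_and excludes P = ""), so (m-1).toNat is exact on the admitted inputs
  let st : Int × List Int := (PySem.List.pyRange 0 n 1).foldl
    (fun (st : Int × List Int) i =>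
      let c := PySem.List.pyGetD T.toList i ' '
      let R := if PySem.Chars.isIn [c] P.toList
               then PySem.Int.band (PySem.Int.bor (st.1 >>> (1 : Nat)) ((2 : Int) ^ (m - 1).toNat)) (M.getD c 0)
               else PySem.Int.band (PySem.Int.bor (st.1 >>> (1 : Nat)) ((2 : Int) ^ (m - 1).toNat)) 0
      let r := if PySem.Int.band R 1 ≠ 0 then st.2 ++ [i - m + 1] else st.2
      (R, r))
    (0, r)
  st.2

-- ===== PORT B =====
def shift_and_alt (P : String) (T : String) : List Int :=
  let m : Int := PySem.Str.len P
  (PySem.List.pyRange 0 (PySem.Str.len T - m + 1) 1).filter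
    (fun s => PySem.List.slice T.toList (some s) (some (s + m)) == P.toList)

-- ===== PRECONDITION & SPEC =====
-- Pre_ excludes only the empty pattern: on it A raises TypeError for non-empty T
-- (2**(m-1) is the float 0.5), and on T = "" A's [] is an accident of the same expression
-- never being reached, while B reports the conventional match of "" at position 0.
def Pre_shift_and (P : String) (T : String) : Prop := P.toList ≠ []
instance (P : String) (T : String) : Decidable (Pre_shift_and P T) := by unfold Pre_shift_and; infer_instance
def pvWitness_shift_and : String × String := ("ab", "xabab")

def Spec_shift_and (P : String) (T : String) (out : List Int) : Prop := out = shift_and_alt P T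
instance (P : String) (T : String) (out : List Int) : Decidable (Spec_shift_and P T out) := by unfold Spec_shift_and; infer_instance

-- ===== CLAIM (what is proved, stated in full; the proofs are below) =====
def Claim_equal_shift_and : Prop := ∀ (P : String) (T : String), Dom_shift_and P T → Pre_shift_and P T → Spec_shift_and P T (shift_and P T)

-- ===== LEMMAS AND PROOFS =====

-- general: concat suffix concat
theorem sa_concat_suffix_concat (xs ys : List Char) (x y : Char) :
    (xs ++ [x]) <:+ (ys ++ [y]) ↔ xs <:+ ys ∧ x = y := by
  rw [← List.reverse_prefix, List.reverse_append, List.reverse_append]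
  simp only [List.reverse_singleton, List.singleton_append, List.cons_prefix_cons,
    List.reverse_prefix]
  tauto

theorem sa_take_succ_getD (p : List Char) (j : Nat) (h : j < p.length) :
    p.take (j + 1) = p.take j ++ [p.getD j ' '] := by
  rw [List.take_add_one, List.getElem?_eq_getElem h, List.getD_eq_getElem p ' ' h]
  rfl

theorem sa_suffix_step (p t' : List Char) (c : Char) (l : Nat) (hl : 0 < l) (hlp : l ≤ p.length) :
    (p.take l <:+ t' ++ [c]) ↔ (p.getD (l - 1) ' ' = c ∧ p.take (l - 1) <:+ t') := by
  have h1 : l - 1 < p.length := by omega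
  have : p.take l = p.take (l - 1) ++ [p.getD (l - 1) ' '] := by
    have := sa_take_succ_getD p (l - 1) h1
    rw [← this]; congr 1; omega
  rw [this, sa_concat_suffix_concat]
  tauto

theorem sa_dict_init (cs : List Char) (d : PySem.Dict Char Int) (h : ∀ c, d.getD c 0 = 0) :
    ∀ c, (cs.foldl (fun M c => M.insert c 0) d).getD c 0 = 0 := by
  induction cs generalizing d with
  | nil => exact h
  | cons a cs ih =>
      intro c
      refine ih (d.insert a 0) (fun c' => ?_) c
      rw [PySem.Dict.getD_insert]
      split <;> simp [h]

theorem sa_cast_pow (e : Nat) : (2 : Int) ^ e = ((2 ^ e : Nat) : Int) := by push_cast; ring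

-- the mask loop
theorem sa_mask (p : List Char) (mI : Int) (hm : mI = (p.length : Int)) :
    ∀ (j : Nat), j ≤ p.length → ∀ c, ∃ u : Nat,
      (((List.range j).foldl (fun M jn =>
          M.insert (PySem.List.pyGetD p (↑jn) ' ')
            (PySem.Int.bor (M.getD (PySem.List.pyGetD p (↑jn) ' ') 0) ((2 : Int) ^ (mI - ↑jn - 1).toNat)))
          (p.foldl (fun M c => M.insert c 0) PySem.Dict.empty)).getD c 0) = ↑u ∧
      (∀ k, u.testBit k = true ↔ (p.length - j ≤ k ∧ k < p.length ∧ p.getD (p.length - 1 - k) ' ' = c)) := by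
  subst hm
  intro j hj c
  induction j generalizing c with
  | zero =>
      refine ⟨0, ?_, ?_⟩
      · simpa using sa_dict_init p PySem.Dict.empty (by simp) c
      · intro k
        simp only [Nat.zero_testBit]
        refine ⟨fun h => absurd h (by simp), ?_⟩
        rintro ⟨h1, h2, -⟩
        exact absurd h2 (by omega)
  | succ j ih =>
      have hj' : j ≤ p.length := by omega
      have hjlt : j < p.length := by omega
      rw [List.range_succ, List.foldl_append, List.foldl_cons, List.foldl_nil]
      set c' := PySem.List.pyGetD p (↑j) ' ' with hc'
      have hc'' : c' = p.getD j ' ' := by simp [hc']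
      obtain ⟨u, hu, hspec⟩ := ih hj' c
      obtain ⟨u', hu', hspec'⟩ := ih hj' c'
      have hexp : (((p.length : Int)) - ↑j - 1).toNat = p.length - 1 - j := by omega
      by_cases hcc : c = c'
      · refine ⟨u' ||| 2 ^ (p.length - 1 - j), ?_, ?_⟩
        · rw [PySem.Dict.getD_insert]
          rw [if_pos hcc, hu', hexp, sa_cast_pow, PySem.Int.bor_natCast]
        · intro k
          rw [Nat.testBit_or, Nat.testBit_two_pow]
          constructor
          · intro h
            rcases Bool.or_eq_true_iff.1 h with h | h
            · have := (hspec' k).1 h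
              refine ⟨by omega, this.2.1, by rw [hcc]; exact this.2.2⟩
            · have hk : p.length - 1 - j = k := by simpa using h
              refine ⟨by omega, by omega, ?_⟩
              rw [← hk]
              have : p.length - 1 - (p.length - 1 - j) = j := by omega
              rw [this, hcc, hc'']

          · rintro ⟨h1, h2, h3⟩
            by_cases hk : k = p.length - 1 - j
            · subst hk; simp
            · have : p.length - j ≤ k := by omega
              have := (hspec' k).2 ⟨this, h2, by rw [← hcc]; exact h3⟩
              simp [this]
      · refine ⟨u, ?_, ?_⟩
        · rw [PySem.Dict.getD_insert, if_neg hcc, hu]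
        · intro k
          rw [hspec k]
          constructor
          · rintro ⟨h1, h2, h3⟩; exact ⟨by omega, h2, h3⟩
          · rintro ⟨h1, h2, h3⟩
            refine ⟨?_, h2, h3⟩
            by_cases hk : k = p.length - 1 - j
            · exfalso; apply hcc; rw [← h3, hk, hc'']
              congr 1; omega
            · omega

theorem sa_scan (p t : List Char) (hp : p ≠ []) (M : PySem.Dict Char Int)
    (hM : ∀ c, ∃ w : Nat, M.getD c 0 = ↑w ∧
      ∀ k, w.testBit k = true ↔ (k < p.length ∧ p.getD (p.length - 1 - k) ' ' = c)) :
    ∀ i, i ≤ t.length → ∃ u : Nat,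
      ((List.range i).foldl
        (fun (st : Int × List Int) (inat : Nat) =>
          let c := PySem.List.pyGetD t (↑inat) ' '
          let R := if PySem.Chars.isIn [c] p
                   then PySem.Int.band (PySem.Int.bor (st.1 >>> (1 : Nat)) ((2 : Int) ^ (((p.length : Int)) - 1).toNat)) (M.getD c 0)
                   else PySem.Int.band (PySem.Int.bor (st.1 >>> (1 : Nat)) ((2 : Int) ^ (((p.length : Int)) - 1).toNat)) 0
          let r := if PySem.Int.band R 1 ≠ 0 then st.2 ++ [(↑inat : Int) - ↑p.length + 1] else st.2
          (R, r))
        ((0 : Int), ([] : List Int)))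
      = (↑u, ((List.range i).filter (fun x => decide (p <:+ t.take (x+1)))).map (fun x : Nat => ((x : Int) - (p.length : Int) + 1))) ∧
      (∀ k, u.testBit k = true ↔ (k < p.length ∧ p.take (p.length - k) <:+ t.take i)) := by
  intro i hi
  induction i with
  | zero =>
      refine ⟨0, by simp, ?_⟩
      intro k
      simp only [Nat.zero_testBit]
      refine ⟨fun h => absurd h (by simp), ?_⟩
      rintro ⟨hk, hs⟩
      have h1 : (p.take (p.length - k)).length ≤ (t.take 0).length := hs.length_le
      simp at h1
      omega
  | succ i ih =>
      have hi' : i ≤ t.length := by omega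
      have hilt : i < t.length := by omega
      obtain ⟨u, hu, hspec⟩ := ih hi'
      rw [List.range_succ, List.foldl_append, List.foldl_cons, List.foldl_nil, hu]
      set c := PySem.List.pyGetD t (↑i) ' ' with hcdef
      have hc : c = t.getD i ' ' := by simp [hcdef]
      have hm1 : 0 < p.length := List.length_pos_iff.2 hp
      have hexp : (((p.length : Int)) - 1).toNat = p.length - 1 := by omega
      have htake : t.take (i + 1) = t.take i ++ [c] := by rw [hc]; exact sa_take_succ_getD t i hilt
      -- the new register value, as a natural number
      have hshift : ((↑u : Int) >>> (1 : Nat)) = ((u >>> 1 : Nat) : Int) := by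
        simp [Int.natCast_shiftRight]
      by_cases hin : PySem.Chars.isIn [c] p = true
      · -- c occurs in p
        have hcp : c ∈ p := (List.singleton_infix_iff c p).1 ((PySem.Chars.isIn_iff_infix _ _).1 hin)
        obtain ⟨w, hw, hwspec⟩ := hM c
        have hR : (if PySem.Chars.isIn [c] p
                   then PySem.Int.band (PySem.Int.bor ((↑u : Int) >>> (1 : Nat)) ((2 : Int) ^ (((p.length : Int)) - 1).toNat)) (M.getD c 0)
                   else PySem.Int.band (PySem.Int.bor ((↑u : Int) >>> (1 : Nat)) ((2 : Int) ^ (((p.length : Int)) - 1).toNat)) 0)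
            = ((((u >>> 1) ||| 2 ^ (p.length - 1)) &&& w : Nat) : Int) := by
          rw [if_pos hin, hshift, hexp, sa_cast_pow, PySem.Int.bor_natCast, hw, PySem.Int.band_natCast]
        set v : Nat := ((u >>> 1) ||| 2 ^ (p.length - 1)) &&& w with hvdef
        have hvspec : ∀ k, v.testBit k = true ↔ (k < p.length ∧ p.take (p.length - k) <:+ t.take (i+1)) := by
          intro k
          rw [hvdef, Nat.testBit_and, Nat.testBit_or, Nat.testBit_shiftRight, Nat.testBit_two_pow, htake]
          constructor
          · intro h
            have h1 := h
            rw [Bool.and_eq_true] at h1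
            have hw1 := (hwspec k).1 h1.2
            refine ⟨hw1.1, ?_⟩
            rw [sa_suffix_step p (t.take i) c (p.length - k) (by omega) (by omega)]
            refine ⟨by have := hw1.2; rwa [show p.length - k - 1 = p.length - 1 - k by omega], ?_⟩
            rcases Bool.or_eq_true_iff.1 h1.1 with h2 | h2
            · have h3 := (hspec (1 + k)).1 h2
              rw [show p.length - (1 + k) = p.length - k - 1 by omega] at h3
              exact h3.2
            · have hk : p.length - 1 = k := by simpa using h2
              rw [show p.length - k - 1 = 0 by omega]
              simp [List.nil_suffix]
          · rintro ⟨hk, hs⟩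
            rw [sa_suffix_step p (t.take i) c (p.length - k) (by omega) (by omega)] at hs
            have hwbit : w.testBit k = true := (hwspec k).2
              ⟨hk, by have := hs.1; rwa [show p.length - 1 - k = p.length - k - 1 by omega]⟩
            rw [Bool.and_eq_true]
            refine ⟨?_, hwbit⟩
            rw [Bool.or_eq_true_iff]
            by_cases hk1 : k = p.length - 1
            · right; simp [hk1]
            · left
              refine (hspec (1 + k)).2 ⟨by omega, ?_⟩
              rw [show p.length - (1 + k) = p.length - k - 1 by omega]
              exact hs.2
        refine ⟨v, ?_, hvspec⟩
        simp only [hR]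
        refine Prod.ext rfl ?_
        simp only
        rw [List.filter_append, List.map_append, List.filter_cons, List.filter_nil]
        have hemit : (PySem.Int.band ((v : Nat) : Int) 1 ≠ 0) ↔ (p <:+ t.take (i + 1)) := by
          rw [show (1 : Int) = ((1 : Nat) : Int) by norm_num, PySem.Int.band_natCast]
          rw [Nat.and_one_is_mod]
          constructor
          · intro h
            have : v % 2 = 1 := by omega
            have h4 := (hvspec 0).1 (by simp [Nat.testBit_zero, this])
            rw [Nat.sub_zero, List.take_length] at h4
            exact h4.2
          · intro h
            have : v.testBit 0 = true := (hvspec 0).2 ⟨hm1, by rwa [Nat.sub_zero, List.take_length]⟩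
            simp only [Nat.testBit_zero, decide_eq_true_eq] at this
            omega
        by_cases hmatch : p <:+ t.take (i + 1)
        · rw [if_pos (hemit.2 hmatch), if_pos (by simpa using hmatch)]
          simp
        · rw [if_neg (fun h => hmatch (hemit.1 h)), if_neg (by simpa using hmatch)]
          simp
      · -- c does not occur in p: the register is zeroed
        have hcp : c ∉ p := fun h =>
          hin ((PySem.Chars.isIn_iff_infix _ _).2 ((List.singleton_infix_iff c p).2 h))
        have hR : (if PySem.Chars.isIn [c] p
                   then PySem.Int.band (PySem.Int.bor ((↑u : Int) >>> (1 : Nat)) ((2 : Int) ^ (((p.length : Int)) - 1).toNat)) (M.getD c 0)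
                   else PySem.Int.band (PySem.Int.bor ((↑u : Int) >>> (1 : Nat)) ((2 : Int) ^ (((p.length : Int)) - 1).toNat)) 0)
            = (((0 : Nat)) : Int) := by
          rw [if_neg (by simpa using hin)]
          simp [PySem.Int.band_zero]
        have hvspec : ∀ k, (0 : Nat).testBit k = true ↔ (k < p.length ∧ p.take (p.length - k) <:+ t.take (i+1)) := by
          intro k
          simp only [Nat.zero_testBit]
          refine ⟨fun h => absurd h (by simp), ?_⟩
          rintro ⟨hk, hs⟩
          rw [htake, sa_suffix_step p (t.take i) c (p.length - k) (by omega) (by omega)] at hs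
          exfalso
          apply hcp
          rw [← hs.1]
          have hlt : p.length - k - 1 < p.length := by omega
          rw [List.getD_eq_getElem p ' ' hlt]
          exact List.getElem_mem hlt
        refine ⟨0, ?_, hvspec⟩
        simp only [hR]
        refine Prod.ext rfl ?_
        simp only
        rw [List.filter_append, List.map_append, List.filter_cons, List.filter_nil]
        have hnomatch : ¬ (p <:+ t.take (i + 1)) := by
          intro h
          have := (hvspec 0).2 ⟨hm1, by rwa [Nat.sub_zero, List.take_length]⟩
          simp at this
        rw [if_neg (by simp [show PySem.Int.band 0 1 = 0 from rfl]), if_neg (by simpa using hnomatch)]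
        simp

theorem sa_suffix_iff_drop (l w : List Char) (h : l.length ≤ w.length) :
    l <:+ w ↔ w.drop (w.length - l.length) = l := by
  constructor
  · rintro ⟨pre, rfl⟩
    rw [List.length_append, Nat.add_sub_cancel, List.drop_left]
  · intro h'
    rw [← h']
    exact List.drop_suffix _ _

theorem sa_reindex (p t : List Char) (hp : p ≠ []) :
    ∀ i, i ≤ t.length →
      ((List.range i).filter (fun x => decide (p <:+ t.take (x+1)))).map
          (fun x : Nat => ((x : Int) - (p.length : Int) + 1))
        = (PySem.List.pyRange 0 ((i : Int) - (p.length : Int) + 1)).filter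
            (fun s => PySem.List.slice t (some s) (some (s + (p.length : Int))) == p) := by
  have hm1 : 0 < p.length := List.length_pos_iff.2 hp
  intro i hi
  induction i with
  | zero =>
      rw [PySem.List.pyRange_one_eq_nil (by omega)]
      simp
  | succ i ih =>
      have hi' : i ≤ t.length := by omega
      rw [List.range_succ, List.filter_append, List.map_append, List.filter_cons, List.filter_nil,
        ih hi']
      by_cases hcase : p.length ≤ i + 1
      · have hb : (((i + 1 : Nat) : Int) - (p.length : Int) + 1)
            = ((i : Int) - (p.length : Int) + 1) + 1 := by push_cast; ring
        rw [hb, PySem.List.pyRange_one_succ_right (a := 0) (b := (i : Int) - (p.length : Int) + 1) (by omega), List.filter_append]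
        congr 1
        rw [List.filter_cons, List.filter_nil]
        have hiff : (List.take ((i+1) - (i+1-p.length)) (List.drop (i+1-p.length) t) = p)
            ↔ (p <:+ t.take (i + 1)) := by
          rw [← List.drop_take]
          have hlen : (t.take (i+1)).length = i + 1 := by rw [List.length_take]; omega
          rw [sa_suffix_iff_drop p (t.take (i+1)) (by rw [hlen]; omega), hlen]
        have e1 : ((i : Int) - (p.length : Int) + 1) = ((i + 1 - p.length : Nat) : Int) := by
          omega
        have e2 : (((i : Int) - (p.length : Int) + 1) + (p.length : Int)) = ((i + 1 : Nat) : Int) := by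
          push_cast; omega
        have hcond : (PySem.List.slice t (some ((i : Int) - (p.length : Int) + 1))
              (some (((i : Int) - (p.length : Int) + 1) + (p.length : Int))) == p)
            = decide (p <:+ t.take (i + 1)) := by
          rw [e2, e1, PySem.List.slice_natCast]
          by_cases hmatch : p <:+ t.take (i + 1)
          · rw [decide_eq_true hmatch, beq_iff_eq.mpr (hiff.2 hmatch)]
          · rw [decide_eq_false hmatch]
            exact beq_eq_false_iff_ne.mpr (fun h => hmatch (hiff.1 h))
        rw [hcond]
        by_cases hmatch : p <:+ t.take (i + 1)
        · rw [if_pos (by simpa using hmatch), if_pos (by simpa using hmatch)]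
          simp
        · rw [if_neg (by simpa using hmatch), if_neg (by simpa using hmatch)]
          simp
      · have hnm : ¬ (p <:+ t.take (i + 1)) := by
          intro h
          have := h.length_le
          rw [List.length_take] at this
          omega
        rw [if_neg (by simpa using hnm)]
        simp only [List.map_nil, List.append_nil]
        rw [PySem.List.pyRange_one_eq_nil (by omega),
          PySem.List.pyRange_one_eq_nil (by push_cast; omega)]

theorem sa_main (P T : String) (hp : P.toList ≠ []) : shift_and P T = shift_and_alt P T := by
  unfold shift_and shift_and_alt
  simp only [PySem.Str.len_eq, PySem.List.pyRange_zero_nat, List.foldl_map]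
  have hM : ∀ c, ∃ w : Nat,
      ((List.range P.toList.length).foldl (fun M jn =>
          M.insert (PySem.List.pyGetD P.toList (↑jn) ' ')
            (PySem.Int.bor (M.getD (PySem.List.pyGetD P.toList (↑jn) ' ') 0)
              ((2 : Int) ^ (((P.toList.length : Int)) - ↑jn - 1).toNat)))
        (P.toList.foldl (fun M c => M.insert c 0) PySem.Dict.empty)).getD c 0 = ↑w ∧
      ∀ k, w.testBit k = true ↔ (k < P.toList.length ∧ P.toList.getD (P.toList.length - 1 - k) ' ' = c) := by
    intro c
    obtain ⟨w, hw, hs⟩ := sa_mask P.toList ((P.toList.length : Int)) rfl P.toList.length le_rfl c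
    refine ⟨w, hw, fun k => ?_⟩
    rw [hs k]
    constructor
    · rintro ⟨-, h2, h3⟩; exact ⟨h2, h3⟩
    · rintro ⟨h2, h3⟩; exact ⟨by omega, h2, h3⟩
  obtain ⟨u, hu, -⟩ := sa_scan P.toList T.toList hp _ hM T.toList.length le_rfl
  exact (congrArg Prod.snd hu).trans (sa_reindex P.toList T.toList hp T.toList.length le_rfl)

-- ===== VERDICT (by name: the statement is the Claim_ definition above) =====
theorem shift_and_spec : Claim_equal_shift_and := by
  intro P T _ hPre
  unfold Spec_shift_and
  exact sa_main P T hPre
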